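-- pv_equiv track=rewrite | github.com/diogoredin/Picross | source/final.py | linha_completa
-- ===== SOURCE A (Python) =====
-- def linha_completa(especificacoes,celulas):
--     '''linha_completa : tuplo x lista -> logico
--        linha_completa(t) recebe como argumento um tuplo com a especificacao de uma linha ou coluna, e
--        uma lista com os conteudos das celulas de uma linha / coluna, e verifica se a linha / coluna em
--        questao satisfaz a especificacao recebida.'''
--
--     # Lista com o numero de blocos seguidos de celulas preenchidas ("especificacoes")
--     lista_ocorrencias = []
--
--     somador = 0
--
--     # Por cada celula dada
--     for celula in range(0, len(celulas)):
--
--         # Se a celula esta preenchida registamos a ocorrencia num somador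
--         if celulas[celula] == 2:
--             somador += 1
--
--         # Se a celula nao esta preenchida fazemos reset ao somador e registamos o valor que tinha
--         # (que corresponde ao numero de celulas preenchidas seguidas que encontramos)
--         else:
--             if somador != 0:
--                 lista_ocorrencias.append(somador)
--                 somador = 0
--
--     # Caso fossem todas preenchidas temos de passar o somador na mesma
--     if somador != 0:
--         lista_ocorrencias.append(somador)
--
--     # Se ha celulas vazias a linhas nao esta completa
--     if not(any(celulas[celula] == 0 for celula in range(0, len(celulas)))):
--
--         # Se os blocos de celulas preenchidas sao iguais as especificacoes, a linha / coluna esta correta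
--         return (especificacoes == tuple(lista_ocorrencias))
--
--     else:
--         return False
-- ===== SOURCE B (Python) =====
-- def linha_completa(especificacoes, celulas):
--     if 0 in celulas:
--         return False
--     runs = []
--     i, n = 0, len(celulas)
--     while i < n:
--         if celulas[i] != 2:
--             i += 1
--         else:
--             j = i + 1
--             while j < n and celulas[j] == 2:
--                 j += 1
--             runs.append(j - i)
--             i = j
--     return especificacoes == tuple(runs)
-- ===== Notes on version B (the rewrite author's own statement) =====
-- stated objective: simpler
-- what changed: A scans indices keeping a somador accumulator with a reset-on-empty branch, a post-loop flush and a second any-scan for empty cells; B first exits early on any empty (0) cell and then extracts the maximal blocks of 2s with a two-pointer scan that consumes a whole block at a time and appends its length, comparing the blocks to the specification.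
import Mathlib
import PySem

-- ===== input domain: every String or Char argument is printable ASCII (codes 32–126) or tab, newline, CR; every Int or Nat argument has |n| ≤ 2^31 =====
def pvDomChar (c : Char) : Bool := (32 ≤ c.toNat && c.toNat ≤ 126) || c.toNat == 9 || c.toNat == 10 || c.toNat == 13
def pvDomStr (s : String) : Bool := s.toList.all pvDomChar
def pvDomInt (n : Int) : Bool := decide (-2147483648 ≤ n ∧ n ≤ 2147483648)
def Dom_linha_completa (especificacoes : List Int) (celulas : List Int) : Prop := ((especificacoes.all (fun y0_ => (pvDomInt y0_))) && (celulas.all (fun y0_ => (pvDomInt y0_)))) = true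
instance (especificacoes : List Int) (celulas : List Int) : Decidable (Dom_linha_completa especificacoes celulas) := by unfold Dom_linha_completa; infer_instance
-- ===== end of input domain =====

-- B replaces A's index loop with accumulator-and-flush by an early membership exit plus a
-- direct extraction of the maximal blocks of 2s (objective: simpler).

-- ===== PORT A =====
def linha_completa (especificacoes : List Int) (celulas : List Int) : Bool :=
  -- lista_ocorrencias / somador accumulated over 'for celula in range(0, len(celulas))'
  let st := (PySem.List.pyRange 0 (celulas.length : Int) 1).foldl
      (fun (st : List Int × Int) celula =>
        if PySem.List.pyGetD celulas celula 0 = 2 then (st.1, st.2 + 1)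
        else if st.2 ≠ 0 then (st.1 ++ [st.2], 0) else st)
      ([], 0)
  -- post-loop flush
  let lista_ocorrencias := if st.2 ≠ 0 then st.1 ++ [st.2] else st.1
  if ¬ ((PySem.List.pyRange 0 (celulas.length : Int) 1).any
        (fun celula => PySem.List.pyGetD celulas celula 0 == 0)) then
    especificacoes == lista_ocorrencias
  else
    false

-- ===== PORT B =====
-- while loop of Source B: advance past a non-2 cell, or count a whole block of 2s
-- (the inner 'while j < n and celulas[j] == 2' = takeWhile on the rest) and append its length
def pvRunsGo (runs : List Int) : List Int → List Int
  | [] => runs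
  | c :: cs =>
    if c ≠ 2 then pvRunsGo runs cs
    else pvRunsGo (runs ++ [((cs.takeWhile (· == 2)).length + 1 : Int)]) (cs.dropWhile (· == 2))
termination_by cs => cs.length
decreasing_by
  · simp
  · have := List.length_dropWhile_le (p := fun x : Int => x == 2) (l := cs)
    simp; omega

def linha_completa_alt (especificacoes : List Int) (celulas : List Int) : Bool :=
  if (0 : Int) ∈ celulas then false
  else especificacoes == pvRunsGo [] celulas

-- ===== PRECONDITION & SPEC =====
def Spec_linha_completa (especificacoes : List Int) (celulas : List Int) (out : Bool) : Prop := out = linha_completa_alt especificacoes celulas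
instance (especificacoes : List Int) (celulas : List Int) (out : Bool) : Decidable (Spec_linha_completa especificacoes celulas out) := by unfold Spec_linha_completa; infer_instance

-- ===== CLAIM (what is proved, stated in full; the proofs are below) =====
def Claim_equal_linha_completa : Prop := ∀ (especificacoes : List Int) (celulas : List Int), Dom_linha_completa especificacoes celulas → Spec_linha_completa especificacoes celulas (linha_completa especificacoes celulas)

-- ===== LEMMAS AND PROOFS =====

-- non-accumulator form of pvRunsGo, used only in the proofs
def pvRuns : List Int → List Int
  | [] => []
  | c :: cs =>
    if c ≠ 2 then pvRuns cs
    else ((cs.takeWhile (· == 2)).length + 1 : Int) :: pvRuns (cs.dropWhile (· == 2))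
termination_by cs => cs.length
decreasing_by
  · simp
  · have := List.length_dropWhile_le (p := fun x : Int => x == 2) (l := cs)
    simp; omega

theorem pvRunsGo_eq (runs : List Int) (cs : List Int) :
    pvRunsGo runs cs = runs ++ pvRuns cs := by
  induction runs, cs using pvRunsGo.induct with
  | case1 runs => simp [pvRunsGo, pvRuns]
  | case2 runs c cs hc ih => simp [pvRunsGo, pvRuns, hc, ih]
  | case3 runs c cs hc ih => simp [pvRunsGo, pvRuns, hc, ih]

-- run lengths of cs given a pending run of length s
def pvRunsAux (s : Int) : List Int → List Int
  | [] => if s ≠ 0 then [s] else []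
  | c :: cs => if c = 2 then pvRunsAux (s + 1) cs
               else (if s ≠ 0 then [s] else []) ++ pvRunsAux 0 cs

theorem pvRunsAux_eq_runsB (cs : List Int) :
    pvRunsAux 0 cs = pvRuns cs ∧
    ∀ s : Int, 0 < s →
      pvRunsAux s cs = (s + (cs.takeWhile (· == 2)).length : Int) :: pvRuns (cs.dropWhile (· == 2)) := by
  induction cs with
  | nil => constructor
           · simp [pvRunsAux, pvRuns]
           · intro s hs; simp [pvRunsAux, pvRuns]; omega
  | cons c cs ih =>
    by_cases hc : c = 2
    · subst hc
      constructor
      · have h1 := ih.2 1 (by omega)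
        simp [pvRunsAux, pvRuns, h1]; omega
      · intro s hs
        have h1 := ih.2 (s + 1) (by omega)
        simp [pvRunsAux, h1]; omega
    · constructor
      · simp [pvRunsAux, pvRuns, hc, ih.1]
      · intro s hs
        have ht : (c :: cs).takeWhile (· == (2:Int)) = [] := by simp [hc]
        have hd : (c :: cs).dropWhile (· == (2:Int)) = c :: cs := by simp [hc]
        rw [ht, hd]
        simp [pvRunsAux, hc, ih.1, hs.ne', pvRuns]

theorem pvFold_flush (cs : List Int) : ∀ (l : List Int) (s : Int),
    (let st := cs.foldl
        (fun (st : List Int × Int) v =>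
          if v = 2 then (st.1, st.2 + 1)
          else if st.2 ≠ 0 then (st.1 ++ [st.2], 0) else st)
        (l, s);
     if st.2 ≠ 0 then st.1 ++ [st.2] else st.1) = l ++ pvRunsAux s cs := by
  induction cs with
  | nil => intro l s; by_cases hs : s = 0 <;> simp [pvRunsAux, hs]
  | cons c cs ih =>
    intro l s
    by_cases hc : c = 2
    · simpa [hc, pvRunsAux] using ih l (s + 1)
    · by_cases hs : s = 0
      · simpa [hc, hs, pvRunsAux] using ih l 0
      · have := ih (l ++ [s]) 0
        simp [hc, hs, pvRunsAux] at this ⊢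
        simp [this]

-- ===== VERDICT (by name: the statement is the Claim_ definition above) =====
theorem linha_completa_spec : Claim_equal_linha_completa := by
  intro e c _
  unfold Spec_linha_completa linha_completa linha_completa_alt
  have hfold := PySem.List.foldl_pyRange_zero_pyGetD' c 0
      (fun (st : List Int × Int) v =>
        if v = 2 then (st.1, st.2 + 1)
        else if st.2 ≠ 0 then (st.1 ++ [st.2], 0) else st)
      ([], 0)
  have hmap := PySem.List.map_pyGetD_pyRange_zero' c (0 : Int)
  have hany : ((PySem.List.pyRange 0 (c.length : Int) 1).any
        (fun celula => PySem.List.pyGetD c celula 0 == 0)) = c.any (· == 0) := by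
    conv_lhs => rw [show (fun celula => PySem.List.pyGetD c celula 0 == (0:Int))
      = ((· == (0:Int)) ∘ (fun j => PySem.List.pyGetD c j 0)) from rfl]
    rw [← List.any_map, hmap]
  have hflush := pvFold_flush c [] 0
  rw [(pvRunsAux_eq_runsB c).1] at hflush
  simp only [List.nil_append] at hflush
  simp only [hfold, hany]
  by_cases h0 : (0 : Int) ∈ c
  · have hy : c.any (· == (0:Int)) = true := by
      simp only [List.any_eq_true]; exact ⟨0, h0, by simp⟩
    simp [hy, h0]
  · have hn : c.any (· == (0:Int)) = false := by
      simp only [List.any_eq_false]; intro x hx he; exact h0 ((by simpa using he) ▸ hx)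
    have hgo : pvRunsGo [] c = pvRuns c := by simpa using pvRunsGo_eq [] c
    simp only [ne_eq, ite_not] at hflush
    simp [hn, h0, hflush, hgo]
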